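-- pv_equiv track=rewrite | github.com/Zerryth/algos | algorithmic-toolbox/2.algorithmic-warmup-with-fibonacci/fibonacci_last_digit_of_partial_sum.py | compute_sums_of_pisano_period
-- ===== SOURCE A (Python) =====
-- def compute_sums_of_pisano_period(n):
--     sums = [0, 1]
--     period = 2
--     n_minus_2_sum = 0
--     n_minus_1_sum = 1
--     total_sum = 1
--
--     # sum of up to n = 60,
--     # which is the pisano period length for fib sums last digits
--     for i in range(2, n + 1):
--         if (period >= 60):
--             break
--
--         # compute current fib sum number + add previous sum
--         current_sum = n_minus_2_sum + n_minus_1_sum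
--         total_sum += current_sum
--         sums.append(total_sum)
--
--         # increment pointers
--         n_minus_2_sum = n_minus_1_sum
--         n_minus_1_sum = current_sum
--         period += 1
--
--     return sums
-- ===== SOURCE B (Python) =====
-- def compute_sums_of_pisano_period(n):
--     # Two-pass: generate Fibonacci F(0..L+1), then use sums[j] = F(j+2) - 1.
--     L = max(2, min(n + 1, 60))
--     fibs = []
--     a, b = 0, 1
--     for _ in range(L + 2):
--         fibs.append(a)
--         a, b = b, a + b
--     return [f - 1 for f in fibs[2:]]
-- ===== Notes on version B (the rewrite author's own statement) =====
-- stated objective: alternative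
-- what changed: A fuses advancing the Fibonacci pair and accumulating the running total in one loop with an early break; B computes the clamped length L = max(2, min(n+1, 60)) up front, generates the plain Fibonacci sequence F(0..L+1) in one pass, and maps the identity sums[j] = F(j+2) - 1 over it.
import Mathlib
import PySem

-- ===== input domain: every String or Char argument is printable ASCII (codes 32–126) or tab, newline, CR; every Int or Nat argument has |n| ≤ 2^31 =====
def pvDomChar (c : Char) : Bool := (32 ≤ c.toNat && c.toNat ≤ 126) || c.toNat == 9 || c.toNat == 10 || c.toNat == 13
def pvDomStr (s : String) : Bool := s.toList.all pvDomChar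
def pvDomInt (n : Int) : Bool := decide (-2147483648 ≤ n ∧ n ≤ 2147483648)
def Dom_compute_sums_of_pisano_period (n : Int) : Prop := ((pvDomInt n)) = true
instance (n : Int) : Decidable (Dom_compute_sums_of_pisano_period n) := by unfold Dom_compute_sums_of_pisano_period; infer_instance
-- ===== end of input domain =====

-- B replaces A's fused advance-and-accumulate loop by generating Fibonacci numbers and
-- using the identity sums[j] = F(j+2) - 1 (objective: alternative decomposition, same cost).

-- ===== PORT A =====
-- the loop 'for i in range(2, n+1)' with an early break at period >= 60; the loop variable i
-- is unused, so the (lazy) range is modelled exactly by its trip count (n+1-2).toNat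
def pvAGoLen : Nat → List Int → Int → Int → Int → Int → List Int
  | 0, sums, _, _, _, _ => sums
  | k + 1, sums, period, n2, n1, total =>
    if period ≥ 60 then sums
    else
      let current := n2 + n1
      pvAGoLen k (sums ++ [total + current]) (period + 1) n1 current (total + current)

def compute_sums_of_pisano_period (n : Int) : List Int :=
  pvAGoLen (n + 1 - 2).toNat [0, 1] 2 0 1 1

-- ===== PORT B =====
-- fibGen k a b = the next k Fibonacci numbers starting from the pair (a, b)
def pvFibGen : Nat → Int → Int → List Int
  | 0, _, _ => []
  | k + 1, a, b => a :: pvFibGen k b (a + b)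

def compute_sums_of_pisano_period_alt (n : Int) : List Int :=
  let L := max 2 (min (n + 1) 60)
  ((pvFibGen (L.toNat + 2) 0 1).drop 2).map (fun f => f - 1)

-- ===== PRECONDITION & SPEC =====
def Spec_compute_sums_of_pisano_period (n : Int) (out : List Int) : Prop := out = compute_sums_of_pisano_period_alt n
instance (n : Int) (out : List Int) : Decidable (Spec_compute_sums_of_pisano_period n out) := by unfold Spec_compute_sums_of_pisano_period; infer_instance

-- ===== CLAIM (what is proved, stated in full; the proofs are below) =====
def Claim_equal_compute_sums_of_pisano_period : Prop := ∀ (n : Int), Dom_compute_sums_of_pisano_period n → Spec_compute_sums_of_pisano_period n (compute_sums_of_pisano_period n)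

-- ===== LEMMAS AND PROOFS =====

theorem pvAGoLen_saturate (k : Nat) (sums : List Int) (p n2 n1 t : Int)
    (hp : p ≤ 60) (hk : (60 - p).toNat ≤ k) :
    pvAGoLen k sums p n2 n1 t = pvAGoLen (60 - p).toNat sums p n2 n1 t := by
  induction k generalizing sums p n2 n1 t with
  | zero =>
    have : (60 - p).toNat = 0 := by omega
    rw [this]
  | succ k ih =>
    by_cases h : p ≥ 60
    · have h0 : (60 - p).toNat = 0 := by omega
      rw [h0]
      simp [pvAGoLen, h]
    · have h1 : (60 - p).toNat = (60 - (p + 1)).toNat + 1 := by omega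
      rw [h1]
      simp only [pvAGoLen, if_neg h]
      exact ih _ _ _ _ _ (by omega) (by omega)

theorem compute_sums_of_pisano_period_spec_aux (n : Int)
    (h : -2147483648 ≤ n ∧ n ≤ 2147483648) :
    compute_sums_of_pisano_period n = compute_sums_of_pisano_period_alt n := by
  by_cases h1 : n ≤ 1
  · -- the loop runs zero times and L clamps to 2
    have hr : (n + 1 - 2).toNat = 0 := by omega
    have hL : max 2 (min (n + 1) 60) = 2 := by omega
    simp only [compute_sums_of_pisano_period, compute_sums_of_pisano_period_alt, hr, hL]
    decide
  · by_cases h2 : n ≤ 59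
    · -- the finitely many lengths the loop can actually take
      interval_cases n <;> decide
    · -- n ≥ 60: the loop breaks after 58 steps and L clamps to 60
      have hL : max 2 (min (n + 1) 60) = 60 := by omega
      rw [compute_sums_of_pisano_period,
        pvAGoLen_saturate _ _ _ _ _ _ (by omega) (by omega)]
      simp only [compute_sums_of_pisano_period_alt, hL]
      decide

-- ===== VERDICT (by name: the statement is the Claim_ definition above) =====
theorem compute_sums_of_pisano_period_spec : Claim_equal_compute_sums_of_pisano_period := by
  intro n hd
  unfold Spec_compute_sums_of_pisano_period
  have h : -2147483648 ≤ n ∧ n ≤ 2147483648 := by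
    simpa [Dom_compute_sums_of_pisano_period, pvDomInt] using hd
  exact compute_sums_of_pisano_period_spec_aux n h
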